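-- pv_equiv track=rewrite | github.com/cjdool/progswtest | level2/functionmake.py | solution
-- ===== SOURCE A (Python) =====
-- from collections import deque
--
-- def solution(progresses, speeds):
--     answer = deque([])
--     for pro, s in zip(progresses, speeds):
--         remain = 100 - pro
--         if remain%s == 0:
--             answer.append(remain//s)
--         else:
--             answer.append(remain//s + 1)
--
--     result = []
--     while answer:
--         pivot = answer.popleft()
--         if not answer:
--             result.append(1)
--         else:
--             flag = True
--             idx = 1
--             for nxt in answer:
--                 if nxt > pivot:
--                     result.append(idx)
--                     flag = False
--                     break
--                 idx += 1
--             if flag: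
--                 result.append(idx)
--             for i in range(result[-1]-1):
--                 answer.popleft()
--     return result
-- ===== SOURCE B (Python) =====
-- def solution(progresses, speeds):
--     days = []
--     for pro, s in zip(progresses, speeds):
--         remain = 100 - pro
--         days.append(remain // s if remain % s == 0 else remain // s + 1)
--     if not days:
--         return []
--     result = []
--     pivot = days[0]
--     count = 1
--     for d in days[1:]:
--         if d <= pivot:
--             count += 1
--         else:
--             result.append(count)
--             pivot = d
--             count = 1
--     result.append(count)
--     return result
-- ===== Notes on version B (the rewrite author's own statement) =====
-- stated objective: simpler
-- what changed: Replaced A's deque pop-pivot-then-rescan-and-multi-popleft grouping with a single left-to-right pass keeping a running pivot and counter.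
import Mathlib
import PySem

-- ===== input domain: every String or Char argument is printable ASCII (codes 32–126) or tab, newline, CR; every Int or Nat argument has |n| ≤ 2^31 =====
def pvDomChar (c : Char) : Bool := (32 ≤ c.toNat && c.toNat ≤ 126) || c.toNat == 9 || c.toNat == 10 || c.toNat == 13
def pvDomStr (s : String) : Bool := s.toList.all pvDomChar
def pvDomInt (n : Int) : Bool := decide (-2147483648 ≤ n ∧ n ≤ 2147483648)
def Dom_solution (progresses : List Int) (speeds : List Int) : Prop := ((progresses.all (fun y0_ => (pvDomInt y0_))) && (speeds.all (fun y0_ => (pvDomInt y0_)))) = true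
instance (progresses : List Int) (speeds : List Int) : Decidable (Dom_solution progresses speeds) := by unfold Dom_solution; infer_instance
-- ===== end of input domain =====

-- B replaces A's deque pop-pivot-then-rescan-and-multi-popleft grouping with one
-- left-to-right pass keeping a running pivot and counter (objective: simpler).

-- ===== PORT A =====
-- the inner 'for nxt in answer' scan: first 1-based index with nxt > pivot, else len+1
def solFindIdx (answer : List Int) (pivot : Int) (idx : Nat) : Nat :=
  match answer with
  | [] => idx
  | nxt :: t => if nxt > pivot then idx else solFindIdx t pivot (idx + 1)

-- the 'while answer:' loop (the deque is a List; popleft = take the head, the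
-- 'for i in range(result[-1]-1): answer.popleft()' = drop (idx-1))
def solLoop (answer : List Int) : List Int :=
  match answer with
  | [] => []
  | pivot :: rest =>
    if rest = [] then [1]
    else
      let idx := solFindIdx rest pivot 1
      ((idx : Int)) :: solLoop (rest.drop (idx - 1))
termination_by answer.length
decreasing_by simp

def solution (progresses : List Int) (speeds : List Int) : List Int :=
  let answer := (progresses.zip speeds).foldl
    (fun acc ps =>
      let remain := 100 - ps.1
      if PySem.Int.mod remain ps.2 = 0 then acc ++ [PySem.Int.floordiv remain ps.2]
      else acc ++ [PySem.Int.floordiv remain ps.2 + 1]) []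
  solLoop answer

-- ===== PORT B =====
-- single pass: running pivot, running count, flush count when a larger day appears
def altScan (ds : List Int) (pivot : Int) (count : Int) (result : List Int) : List Int :=
  match ds with
  | [] => result ++ [count]
  | d :: t => if d ≤ pivot then altScan t pivot (count + 1) result
              else altScan t d 1 (result ++ [count])

def solution_alt (progresses : List Int) (speeds : List Int) : List Int :=
  let days := (progresses.zip speeds).foldl
    (fun acc ps =>
      let remain := 100 - ps.1
      if PySem.Int.mod remain ps.2 = 0 then acc ++ [PySem.Int.floordiv remain ps.2]
      else acc ++ [PySem.Int.floordiv remain ps.2 + 1]) []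
  match days with
  | [] => []
  | d :: rest => altScan rest d 1 []

-- ===== PRECONDITION & SPEC =====
-- Python raises ZeroDivisionError on a zero speed that gets zipped with a progress;
-- exactly those inputs are excluded.
def Pre_solution (progresses : List Int) (speeds : List Int) : Prop :=
  ∀ s ∈ List.take progresses.length speeds, s ≠ 0
instance (progresses : List Int) (speeds : List Int) : Decidable (Pre_solution progresses speeds) := by unfold Pre_solution; infer_instance
def pvWitness_solution : List Int × List Int := ([93, 30, 55], [1, 30, 5])

def Spec_solution (progresses : List Int) (speeds : List Int) (out : List Int) : Prop := out = solution_alt progresses speeds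
instance (progresses : List Int) (speeds : List Int) (out : List Int) : Decidable (Spec_solution progresses speeds out) := by unfold Spec_solution; infer_instance

-- ===== CLAIM (what is proved, stated in full; the proofs are below) =====
def Claim_equal_solution : Prop := ∀ (progresses : List Int) (speeds : List Int), Dom_solution progresses speeds → Pre_solution progresses speeds → Spec_solution progresses speeds (solution progresses speeds)

-- ===== LEMMAS AND PROOFS =====

-- length of the leading prefix of elements ≤ p
def cntLe (p : Int) : List Int → Nat
  | [] => 0
  | d :: t => if d ≤ p then cntLe p t + 1 else 0

-- common grouping both loops compute
def groups (ds : List Int) : List Int :=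
  match ds with
  | [] => []
  | p :: rest => ((cntLe p rest + 1 : Nat) : Int) :: groups (rest.drop (cntLe p rest))
termination_by ds.length
decreasing_by simp

theorem solFindIdx_eq (rest : List Int) (p : Int) (i : Nat) :
    solFindIdx rest p i = i + cntLe p rest := by
  induction rest generalizing i with
  | nil => simp [solFindIdx, cntLe]
  | cons d t ih =>
    by_cases h : d ≤ p
    · have : ¬ d > p := by omega
      simp [solFindIdx, cntLe, this, h, ih]; omega
    · have : d > p := by omega
      simp [solFindIdx, cntLe, this, h]

theorem groups_nil : groups [] = [] := by rw [groups]

theorem groups_cons (p : Int) (rest : List Int) :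
    groups (p :: rest) = ((cntLe p rest + 1 : Nat) : Int) :: groups (rest.drop (cntLe p rest)) := by
  rw [groups]

theorem solLoop_eq_groups_aux : ∀ (n : Nat) (ds : List Int), ds.length ≤ n → solLoop ds = groups ds := by
  intro n
  induction n with
  | zero =>
    intro ds hds
    have : ds = [] := by cases ds <;> simp_all
    subst this; rw [solLoop, groups_nil]
  | succ n ih =>
    intro ds hds
    cases ds with
    | nil => rw [solLoop, groups_nil]
    | cons p rest =>
      by_cases h : rest = []
      · subst h; rw [solLoop, groups_cons]; simp [cntLe, groups_nil]
      · rw [solLoop, if_neg h, solFindIdx_eq, groups_cons]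
        simp only [Nat.add_comm 1 (cntLe p rest), Nat.add_sub_cancel]
        rw [ih _ (by simp at hds ⊢; omega)]

theorem solLoop_eq_groups (ds : List Int) : solLoop ds = groups ds :=
  solLoop_eq_groups_aux ds.length ds (le_refl _)

theorem altScan_eq_groups (ds : List Int) (p c : Int) (res : List Int) :
    altScan ds p c res = res ++ ((c + (cntLe p ds : Int)) :: groups (ds.drop (cntLe p ds))) := by
  induction ds generalizing p c res with
  | nil => simp [altScan, cntLe, groups_nil]
  | cons d t ih =>
    by_cases h : d ≤ p
    · rw [altScan, if_pos h, ih, cntLe, if_pos h]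
      simp; ring_nf
    · rw [altScan, if_neg h, ih, cntLe, if_neg h]
      rw [List.drop_zero, groups_cons]
      simp
      ring

-- ===== VERDICT (by name: the statement is the Claim_ definition above) =====
theorem solution_spec : Claim_equal_solution := by
  intro progresses speeds _ _
  unfold Spec_solution solution solution_alt
  simp only []
  rw [solLoop_eq_groups]
  cases h : (progresses.zip speeds).foldl
      (fun acc ps =>
        let remain := 100 - ps.1
        if PySem.Int.mod remain ps.2 = 0 then acc ++ [PySem.Int.floordiv remain ps.2]
        else acc ++ [PySem.Int.floordiv remain ps.2 + 1]) [] with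
  | nil => exact groups_nil
  | cons d rest =>
    show groups (d :: rest) = altScan rest d 1 []
    rw [altScan_eq_groups, groups_cons]
    simp
    ring
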